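-- pv_equiv track=rewrite | github.com/PrakamyaKhare/DSA | hello.py | compute_permutation
-- ===== SOURCE A (Python) =====
-- def compute_permutation(words) :
--     permutations = []
--     for i in range(len(words)) :
--         for j in range(len(words)) :
--             if i != j :
--                 permutation = words[i] + words[j]
--                 for k in range(len(words)) :
--                     if k != j and k != i :
--                         permutation += words[k]
--                 permutations.append(permutation)
--     return permutations
-- ===== SOURCE B (Python) =====
-- def compute_permutation(words):
--     n = len(words)
--     S = "".join(words)
--     off = [len("".join(words[:t])) for t in range(n + 1)]
--     permutations = []
--     for i in range(n):
--         for j in range(n):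
--             if i != j:
--                 lo, hi = (i, j) if i < j else (j, i)
--                 remaining = S[:off[lo]] + S[off[lo + 1]:off[hi]] + S[off[hi + 1]:]
--                 permutations.append(words[i] + words[j] + remaining)
--     return permutations
-- ===== Notes on version B (the rewrite author's own statement) =====
-- stated objective: faster
-- what changed: B precomputes S = ''.join(words) and a prefix-offset table, then builds each 'remaining' part by three slices of S instead of A's inner k-loop of repeated string concatenations.
import Mathlib
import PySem

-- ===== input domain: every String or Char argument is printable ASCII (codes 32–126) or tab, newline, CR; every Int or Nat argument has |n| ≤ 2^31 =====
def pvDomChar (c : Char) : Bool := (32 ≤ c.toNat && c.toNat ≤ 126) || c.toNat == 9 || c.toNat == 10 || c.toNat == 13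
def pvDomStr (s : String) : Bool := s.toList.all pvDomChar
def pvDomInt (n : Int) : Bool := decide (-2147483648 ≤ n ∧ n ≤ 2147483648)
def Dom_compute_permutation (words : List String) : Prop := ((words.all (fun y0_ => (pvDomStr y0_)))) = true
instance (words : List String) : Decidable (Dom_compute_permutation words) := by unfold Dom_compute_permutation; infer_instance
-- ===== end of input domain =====

-- B replaces A's inner k-loop of repeated string concatenations by a precomputed
-- joined string + prefix-offset table and three slices per pair (objective: faster,
-- by a constant-factor mechanism; same return value on every input).

-- ===== PORT A =====
def compute_permutation (words : List String) : List String :=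
  (PySem.List.pyRange 0 (PySem.List.len words)).foldl (fun permutations i =>
    (PySem.List.pyRange 0 (PySem.List.len words)).foldl (fun permutations j =>
      if i ≠ j then
        permutations ++ [(PySem.List.pyRange 0 (PySem.List.len words)).foldl
            (fun permutation k =>
              if k ≠ j ∧ k ≠ i then permutation ++ PySem.List.pyGetD words k "" else permutation)
            (PySem.List.pyGetD words i "" ++ PySem.List.pyGetD words j "")]
      else permutations) permutations) []

-- ===== PORT B =====
def compute_permutation_alt (words : List String) : List String :=
  let S := PySem.Str.join "" words
  let off := (PySem.List.pyRange 0 (PySem.List.len words + 1)).map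
      (fun t => (PySem.Str.len (PySem.Str.join "" (PySem.List.slice words none (some t))) : Int))
  (PySem.List.pyRange 0 (PySem.List.len words)).foldl (fun permutations i =>
    (PySem.List.pyRange 0 (PySem.List.len words)).foldl (fun permutations j =>
      if i ≠ j then
        let lo := if i < j then i else j
        let hi := if i < j then j else i
        let remaining := PySem.Str.slice S none (some (PySem.List.pyGetD off lo 0)) ++
          PySem.Str.slice S (some (PySem.List.pyGetD off (lo + 1) 0)) (some (PySem.List.pyGetD off hi 0)) ++
          PySem.Str.slice S (some (PySem.List.pyGetD off (hi + 1) 0)) none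
        permutations ++ [PySem.List.pyGetD words i "" ++ PySem.List.pyGetD words j "" ++ remaining]
      else permutations) permutations) []

-- ===== PRECONDITION & SPEC =====
def Spec_compute_permutation (words : List String) (out : List String) : Prop := out = compute_permutation_alt words
instance (words : List String) (out : List String) : Decidable (Spec_compute_permutation words out) := by unfold Spec_compute_permutation; infer_instance

-- ===== CLAIM (what is proved, stated in full; the proofs are below) =====
def Claim_equal_compute_permutation : Prop := ∀ (words : List String), Dom_compute_permutation words → Spec_compute_permutation words (compute_permutation words)

-- ===== LEMMAS AND PROOFS =====

lemma join_nil_flatten {α : Type} (css : List (List α)) : [].intercalate css = css.flatten := by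
  induction css with
  | nil => rfl
  | cons c cs ih =>
    cases cs with
    | nil => simp [List.intercalate]
    | cons d ds =>
      simp [List.intercalate, List.intersperse] at ih ⊢
      simpa using ih

def pvOffFun (words : List String) : Int → Int :=
  fun t => (PySem.Str.len (PySem.Str.join "" (PySem.List.slice words none (some t))) : Int)

lemma off_eq (words : List String) (t : Int) (h0 : 0 ≤ t) (hn : t < PySem.List.len words + 1) :
    PySem.List.pyGetD ((PySem.List.pyRange 0 (PySem.List.len words + 1)).map (pvOffFun words)) t 0
      = (((words.map String.toList).take t.toNat).flatten.length : Int) := by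
  rw [PySem.List.pyGetD_map_pyRange_of_nonneg (pvOffFun words) _ t 0 h0 hn]
  simp [pvOffFun, PySem.List.slice_to _ h0, PySem.Chars.join, join_nil_flatten]

lemma flatten_split {α : Type} (M : List (List α)) (u : Nat) :
    M.flatten = (M.take u).flatten ++ (M.drop u).flatten := by
  rw [← List.flatten_append, List.take_append_drop]

lemma flatten_take_len {α : Type} (M : List (List α)) (u : Nat) :
    M.flatten.take ((M.take u).flatten.length) = (M.take u).flatten := by
  rw [flatten_split M u, List.take_left]

lemma flatten_drop_len {α : Type} (M : List (List α)) (u : Nat) :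
    M.flatten.drop ((M.take u).flatten.length) = (M.drop u).flatten := by
  rw [flatten_split M u, List.drop_left]

lemma flatten_take_sub {α : Type} (M : List (List α)) (u v : Nat) (h : u ≤ v) :
    (M.drop u).flatten.take ((M.take v).flatten.length - (M.take u).flatten.length)
      = ((M.drop u).take (v - u)).flatten := by
  have hv : M.take v = M.take u ++ (M.drop u).take (v - u) := by
    rw [← List.take_add]; congr 1; omega
  rw [hv, List.flatten_append, List.length_append, Nat.add_sub_cancel_left,
      flatten_split (M.drop u) (v - u), List.take_left]

lemma seg_words (words : List String) (a b : Int) (ha : 0 ≤ a) (hab : a ≤ b)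
    (hb : b ≤ PySem.List.len words) :
    (PySem.List.pyRange a b).map (fun k => PySem.List.pyGetD words k "")
      = (words.drop a.toNat).take (b.toNat - a.toNat) := by
  have hfull := PySem.List.map_pyGetD_pyRange words "" ha
  rw [PySem.List.pyRange_one_append a b (PySem.List.len words) hab hb, List.map_append] at hfull
  have hlen : ((PySem.List.pyRange a b).map (fun k => PySem.List.pyGetD words k "")).length
      = b.toNat - a.toNat := by
    simp [PySem.List.length_pyRange_one]; omega
  rw [← hfull, List.take_left' hlen]

lemma filter_range_all (a b i j : Int) (h : ∀ k, a ≤ k → k < b → k ≠ j ∧ k ≠ i) :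
    (PySem.List.pyRange a b).filter (fun k => decide (k ≠ j ∧ k ≠ i)) = PySem.List.pyRange a b := by
  apply List.filter_eq_self.mpr
  intro k hk
  rw [PySem.List.mem_pyRange_one] at hk
  simpa using h k hk.1 hk.2

lemma fold_concat (words : List String) (i j : Int) (l : List Int) (p : String) :
    (l.foldl (fun p k => if k ≠ j ∧ k ≠ i then p ++ PySem.List.pyGetD words k "" else p) p).toList
    = p.toList ++ ((l.filter (fun k => decide (k ≠ j ∧ k ≠ i))).map
        (fun k => (PySem.List.pyGetD words k "").toList)).flatten := by
  induction l generalizing p with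
  | nil => simp
  | cons k l ih =>
    by_cases h : k ≠ j ∧ k ≠ i
    · simp [List.foldl_cons, h, ih]
    · simp [List.foldl_cons, h, ih]

lemma core (words : List String) (lo hi : Int) (h0 : 0 ≤ lo) (hlh : lo < hi)
    (hhn : hi < PySem.List.len words) :
    (((PySem.List.pyRange 0 (PySem.List.len words)).filter
        (fun k => decide (k ≠ hi ∧ k ≠ lo))).map
        (fun k => (PySem.List.pyGetD words k "").toList)).flatten
    = (PySem.Str.slice (PySem.Str.join "" words) none
        (some (PySem.List.pyGetD ((PySem.List.pyRange 0 (PySem.List.len words + 1)).map (pvOffFun words)) lo 0))).toList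
      ++ ((PySem.Str.slice (PySem.Str.join "" words)
        (some (PySem.List.pyGetD ((PySem.List.pyRange 0 (PySem.List.len words + 1)).map (pvOffFun words)) (lo + 1) 0))
        (some (PySem.List.pyGetD ((PySem.List.pyRange 0 (PySem.List.len words + 1)).map (pvOffFun words)) hi 0))).toList
      ++ (PySem.Str.slice (PySem.Str.join "" words)
        (some (PySem.List.pyGetD ((PySem.List.pyRange 0 (PySem.List.len words + 1)).map (pvOffFun words)) (hi + 1) 0))
        none).toList) := by
  have hN : PySem.List.len words = (words.length : Int) := by simp [PySem.List.len]
  set M : List (List Char) := words.map String.toList with hM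
  rw [off_eq words lo h0 (by omega), off_eq words (lo+1) (by omega) (by omega),
      off_eq words hi (by omega) (by omega), off_eq words (hi+1) (by omega) (by omega)]
  have hS : (PySem.Str.join "" words).toList = M.flatten := by
    simp [PySem.Chars.join, join_nil_flatten, hM]
  rw [PySem.Str.toList_slice, PySem.Str.toList_slice, PySem.Str.toList_slice]
  simp only [PySem.Chars.slice_eq_listSlice, hS]
  rw [PySem.List.slice_to_natCast, PySem.List.slice_natCast, PySem.List.slice_from_natCast]
  rw [PySem.List.pyRange_one_append 0 lo (PySem.List.len words) h0 (by omega),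
      PySem.List.pyRange_one_append lo (lo+1) (PySem.List.len words) (by omega) (by omega),
      PySem.List.pyRange_one_append (lo+1) hi (PySem.List.len words) (by omega) (by omega),
      PySem.List.pyRange_one_append hi (hi+1) (PySem.List.len words) (by omega) (by omega),
      PySem.List.pyRange_one_singleton lo, PySem.List.pyRange_one_singleton hi]
  rw [List.filter_append, List.filter_append, List.filter_append, List.filter_append]
  rw [filter_range_all 0 lo lo hi (by intro k h1 h2; constructor <;> omega),
      filter_range_all (lo+1) hi lo hi (by intro k h1 h2; constructor <;> omega),
      filter_range_all (hi+1) (PySem.List.len words) lo hi (by intro k h1 h2; constructor <;> omega)]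
  have hfl : List.filter (fun k => decide (k ≠ hi ∧ k ≠ lo)) [lo] = [] := by simp
  have hfh : List.filter (fun k => decide (k ≠ hi ∧ k ≠ lo)) [hi] = [] := by simp
  rw [hfl, hfh, List.nil_append, List.nil_append, List.map_append, List.map_append]
  rw [show (fun k => (PySem.List.pyGetD words k "").toList)
        = String.toList ∘ (fun k => PySem.List.pyGetD words k "") from rfl]
  rw [← List.map_map, ← List.map_map, ← List.map_map]
  rw [seg_words words 0 lo (by omega) (by omega) (by omega),
      seg_words words (lo+1) hi (by omega) (by omega) (by omega),
      seg_words words (hi+1) (PySem.List.len words) (by omega) (by omega) (by omega)]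
  rw [List.map_take, List.map_drop, List.map_take, List.map_drop, List.map_take, List.map_drop, ← hM]
  rw [List.flatten_append, List.flatten_append]
  have e1 : M.flatten.take ((M.take lo.toNat).flatten.length)
      = ((M.drop (0:Int).toNat).take (lo.toNat - (0:Int).toNat)).flatten := by
    simpa using flatten_take_len M lo.toNat
  have e2 : (M.flatten.drop ((M.take (lo+1).toNat).flatten.length)).take
        ((M.take hi.toNat).flatten.length - (M.take (lo+1).toNat).flatten.length)
      = ((M.drop (lo+1).toNat).take (hi.toNat - (lo+1).toNat)).flatten := by
    rw [flatten_drop_len M (lo+1).toNat, flatten_take_sub M (lo+1).toNat hi.toNat (by omega)]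
  have e3 : M.flatten.drop ((M.take (hi+1).toNat).flatten.length)
      = ((M.drop (hi+1).toNat).take ((PySem.List.len words).toNat - (hi+1).toNat)).flatten := by
    rw [flatten_drop_len M (hi+1).toNat]
    congr 1
    rw [List.take_of_length_le]
    have hMl : M.length = words.length := by simp [hM]
    simp only [List.length_drop]
    omega
  rw [e1, e2, e3]

lemma pair_eq (words : List String) (i j : Int)
    (hi : 0 ≤ i) (hin : i < PySem.List.len words)
    (hj : 0 ≤ j) (hjn : j < PySem.List.len words) (hij : i ≠ j) :
    (PySem.List.pyRange 0 (PySem.List.len words)).foldl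
        (fun permutation k =>
          if k ≠ j ∧ k ≠ i then permutation ++ PySem.List.pyGetD words k "" else permutation)
        (PySem.List.pyGetD words i "" ++ PySem.List.pyGetD words j "")
    = PySem.List.pyGetD words i "" ++ PySem.List.pyGetD words j "" ++
        ((PySem.Str.slice (PySem.Str.join "" words) none
            (some (PySem.List.pyGetD ((PySem.List.pyRange 0 (PySem.List.len words + 1)).map (pvOffFun words)) (if i < j then i else j) 0))) ++
          (PySem.Str.slice (PySem.Str.join "" words)
            (some (PySem.List.pyGetD ((PySem.List.pyRange 0 (PySem.List.len words + 1)).map (pvOffFun words)) ((if i < j then i else j) + 1) 0))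
            (some (PySem.List.pyGetD ((PySem.List.pyRange 0 (PySem.List.len words + 1)).map (pvOffFun words)) (if i < j then j else i) 0))) ++
          (PySem.Str.slice (PySem.Str.join "" words)
            (some (PySem.List.pyGetD ((PySem.List.pyRange 0 (PySem.List.len words + 1)).map (pvOffFun words)) ((if i < j then j else i) + 1) 0))
            none)) := by
  apply String.toList_inj.mp
  rw [fold_concat]
  rcases lt_or_gt_of_ne hij with hlt | hgt
  · simp only [if_pos hlt]
    rw [core words i j hi hlt hjn]
    simp [List.append_assoc]
  · simp only [if_neg (not_lt.mpr (le_of_lt hgt))]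
    have hswap : (fun k => decide (k ≠ j ∧ k ≠ i)) = (fun k => decide (k ≠ i ∧ k ≠ j)) := by
      funext k; exact decide_eq_decide.mpr (by tauto)
    rw [hswap, core words j i hj hgt hin]
    simp [List.append_assoc]

-- ===== VERDICT (by name: the statement is the Claim_ definition above) =====
theorem compute_permutation_spec : Claim_equal_compute_permutation := by
  intro words _
  unfold Spec_compute_permutation compute_permutation compute_permutation_alt
  refine PySem.List.foldl_congr_mem _ _ _ _ ?_
  intro acc i hiMem
  refine PySem.List.foldl_congr_mem _ _ _ _ ?_
  intro acc2 j hjMem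
  rw [PySem.List.mem_pyRange_one] at hiMem hjMem
  by_cases hij : i ≠ j
  · simp only [if_pos hij]
    simp only [show (fun t => (PySem.Str.len (PySem.Str.join "" (PySem.List.slice words none (some t))) : Int))
        = pvOffFun words from rfl]
    rw [pair_eq words i j hiMem.1 hiMem.2 hjMem.1 hjMem.2 hij]
  · simp [hij]
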